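-- pv_equiv track=rewrite | github.com/samgensburg/adventofcode | 2023/13.py | find_row_b
-- ===== SOURCE A (Python) =====
-- def count_diffs(str_a, str_b):
-- 	count = 0
-- 	for i in range(len(str_a)):
-- 		if str_a[i] != str_b[i]:
-- 			count += 1
-- 	return count
--
-- def find_row_b(pattern):
-- 	row_count = len(pattern)
-- 	#import pdb; pdb.set_trace()
-- 	for reflection_row in range(1, row_count):
-- 		smudge_count = 0
-- 		for i in range(row_count):
-- 			if i < reflection_row:
-- 				reflected_i = reflection_row * 2 - i - 1
-- 				if reflected_i < row_count:
-- 					smudge_count += count_diffs(pattern[i], pattern[reflected_i])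
-- 			else:
-- 				reflected_i = reflection_row * 2 - 1 - i
-- 				if reflected_i >= 0:
-- 					smudge_count += count_diffs(pattern[i], pattern[reflected_i])
-- 		if smudge_count == 2:
-- 			return reflection_row
-- 	return -1
-- ===== SOURCE B (Python) =====
-- def count_diffs(str_a, str_b):
-- 	return sum(1 for i in range(len(str_a)) if str_a[i] != str_b[i])
--
-- def find_row_b(pattern):
-- 	for r in range(1, len(pattern)):
-- 		top = pattern[:r][::-1]
-- 		bottom = pattern[r:]
-- 		if sum(count_diffs(a, b) for a, b in zip(top, bottom)) == 1:
-- 			return r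
-- 	return -1
-- ===== Notes on version B (the rewrite author's own statement) =====
-- stated objective: simpler
-- what changed: Replaces the full-range index-arithmetic scan with its top/bottom branches and double counting by slicing the pattern into reversed-top and bottom halves and summing diffs once over zip-aligned mirrored pairs, testing == 1 instead of == 2.
-- outside the precondition, e.g. on find_row_b(['ab', 'aa', 'xyz']): A returns 1, B returns 1; on find_row_b(['aa', 'ab', '']): A returns 1, B returns 1
import Mathlib
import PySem

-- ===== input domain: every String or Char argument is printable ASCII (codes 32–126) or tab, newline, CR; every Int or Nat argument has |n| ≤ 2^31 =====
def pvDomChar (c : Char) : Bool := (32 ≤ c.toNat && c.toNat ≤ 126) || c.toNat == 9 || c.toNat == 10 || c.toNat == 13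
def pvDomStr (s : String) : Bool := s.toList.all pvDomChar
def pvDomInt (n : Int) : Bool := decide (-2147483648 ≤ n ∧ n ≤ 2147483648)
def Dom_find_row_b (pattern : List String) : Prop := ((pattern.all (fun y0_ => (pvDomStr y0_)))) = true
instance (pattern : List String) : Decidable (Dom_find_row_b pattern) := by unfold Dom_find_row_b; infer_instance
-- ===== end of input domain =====

-- B replaces A's index-arithmetic scan with double counting by a single zip over
-- reversed-top/bottom halves counting each mirrored pair once (== 1 vs == 2); simpler.

-- ===== PORT A =====
-- count_diffs (the helper both Pythons share): loop i in range(len(str_a)), compare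
-- str_a[i] with str_b[i].  b[i]? = none is Python's IndexError: the Python returns no
-- value through that case (nothing is claimed there), so the port skips the comparison.
def countDiffs (a b : List Char) : Int :=
  (List.range a.length).foldl (fun c i =>
    match a[i]?, b[i]? with
    | some x, some y => if x ≠ y then c + 1 else c
    | _, _ => c) 0

-- the outer 'for reflection_row in range(1, row_count)' loop, as recursion on r
def findRowGoA (rows : List (List Char)) (n r : Nat) : Int :=
  if _h : r < n then
    let smudge := (List.range n).foldl (fun s i =>
      if i < r then
        let ri := r * 2 - i - 1
        if ri < n then s + countDiffs (rows.getD i []) (rows.getD ri []) else s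
      else
        let ri : Int := (r : Int) * 2 - 1 - (i : Int)
        if ri ≥ 0 then s + countDiffs (rows.getD i []) (rows.getD ri.toNat []) else s) 0
    if smudge = 2 then (r : Int) else findRowGoA rows n (r + 1)
  else -1
termination_by n - r

def find_row_b (pattern : List String) : Int :=
  let rows := pattern.map String.toList
  findRowGoA rows rows.length 1

-- ===== PORT B =====
def findRowGoB (rows : List (List Char)) (r : Nat) : Int :=
  if _h : r < rows.length then
    let top := (rows.take r).reverse
    let bottom := rows.drop r
    if ((top.zip bottom).map (fun p => countDiffs p.1 p.2)).sum = 1 then (r : Int)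
    else findRowGoB rows (r + 1)
  else -1
termination_by rows.length - r

def find_row_b_alt (pattern : List String) : Int :=
  findRowGoB (pattern.map String.toList) 1

-- ===== PRECONDITION & SPEC =====
-- Pre_ restricts to rectangular patterns (all rows the same length), the puzzle's domain:
-- on ragged patterns A's count_diffs raises IndexError on any pair of unequal-length rows
-- it compares (except when an earlier candidate row already returned — see cites).
def Pre_find_row_b (pattern : List String) : Prop :=
  ∀ s ∈ pattern, ∀ t ∈ pattern, s.length = t.length
instance (pattern : List String) : Decidable (Pre_find_row_b pattern) := by
  unfold Pre_find_row_b; infer_instance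
def pvWitness_find_row_b : List String := ["#.", "##", "##", "#."]

def Spec_find_row_b (pattern : List String) (out : Int) : Prop := out = find_row_b_alt pattern
instance (pattern : List String) (out : Int) : Decidable (Spec_find_row_b pattern out) := by unfold Spec_find_row_b; infer_instance

-- ===== CLAIM (what is proved, stated in full; the proofs are below) =====
def Claim_equal_find_row_b : Prop := ∀ (pattern : List String), Dom_find_row_b pattern → Pre_find_row_b pattern → Spec_find_row_b pattern (find_row_b pattern)

-- ===== LEMMAS AND PROOFS =====

theorem foldl_ext {α β : Type} (f g : β → α → β) (h : ∀ s x, f s x = g s x) :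
    ∀ (l : List α) (i : β), l.foldl f i = l.foldl g i := by
  intro l
  induction l with
  | nil => intro i; rfl
  | cons x l ih => intro i; simp only [List.foldl]; rw [h, ih]

theorem foldl_add_map {α : Type} (g : α → Int) (l : List α) (init : Int) :
    l.foldl (fun s x => s + g x) init = init + (l.map g).sum := by
  induction l generalizing init with
  | nil => simp
  | cons x l ih => simp [List.foldl, ih]; ring

theorem sum_map_range (g : Nat → Int) (n : Nat) :
    ((List.range n).map g).sum = ∑ i ∈ Finset.range n, g i := by
  induction n with
  | zero => simp
  | succ n ih => simp [List.range_succ, Finset.sum_range_succ, ih]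

theorem foldl_shift {α : Type} (f : Int → α → Int) (Hf : ∀ c x, f c x = c + f 0 x) :
    ∀ (l : List α) (c : Int), l.foldl f c = c + l.foldl f 0 := by
  intro l
  induction l with
  | nil => intro c; simp
  | cons x l ih =>
    intro c
    simp only [List.foldl_cons]
    rw [ih (f c x), ih (f 0 x), Hf c x]
    ring

theorem foldl_id {α : Type} (l : List α) (c : Int) : l.foldl (fun c _ => c) c = c := by
  induction l generalizing c with
  | nil => rfl
  | cons x l ih => simp only [List.foldl_cons]; exact ih c

-- count_diffs against a too-short right row counts nothing
theorem cdA_nil_right (a : List Char) : countDiffs a [] = 0 := by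
  unfold countDiffs
  rw [foldl_ext _ (fun c _ => c) (by
    intro c i
    cases a[i]? <;> rfl) _ _]
  exact foldl_id _ _

-- one unfolding step of countDiffs on cons cells
theorem cdA_cons (x y : Char) (a b : List Char) :
    countDiffs (x :: a) (y :: b) = (if x ≠ y then 1 else 0) + countDiffs a b := by
  unfold countDiffs
  simp only [List.length_cons, List.range_succ_eq_map, List.foldl_cons, List.foldl_map,
    List.getElem?_cons_succ, List.getElem?_cons_zero]
  rw [foldl_shift _ (fun c i => by
    cases a[i]? <;> cases b[i]? <;> dsimp only <;> first | (split_ifs <;> ring) | ring)]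
  by_cases hxy : x = y <;> simp [hxy]

-- countDiffs is symmetric
theorem countDiffs_symm (a b : List Char) :
    countDiffs a b = countDiffs b a := by
  induction a generalizing b with
  | nil => cases b with
    | nil => rfl
    | cons y b => rw [cdA_nil_right]; rfl
  | cons x a ih =>
    cases b with
    | nil => rw [cdA_nil_right]; rfl
    | cons y b =>
      rw [cdA_cons, cdA_cons, ih b]
      by_cases hxy : x = y <;> simp [hxy, eq_comm]

-- the B-side inner sum as an indexed sum
theorem sumB_eq (rows : List (List Char)) (r : Nat) (hr : r ≤ rows.length) :
    ((((rows.take r).reverse.zip (rows.drop r)).map (fun p => countDiffs p.1 p.2)).sum)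
      = ∑ k ∈ Finset.range (min r (rows.length - r)),
          countDiffs (rows.getD (r - 1 - k) []) (rows.getD (r + k) []) := by
  have hz : ((rows.take r).reverse.zip (rows.drop r))
      = (List.range (min r (rows.length - r))).map
          (fun k => (rows.getD (r - 1 - k) [], rows.getD (r + k) [])) := by
    apply List.ext_getElem
    · simp only [List.length_zip, List.length_reverse, List.length_take, List.length_drop,
        List.length_map, List.length_range]
      omega
    · intro k h1 h2
      simp only [List.length_zip, List.length_reverse, List.length_take, List.length_drop] at h1
      have hk1 : k < r := lt_of_lt_of_le h1 (by omega)
      have hk2 : r + k < rows.length := by omega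
      have hidx : r - 1 - k < rows.length := by omega
      simp only [List.getElem_zip, List.getElem_map, List.getElem_range, List.getElem_reverse,
        List.getElem_take, List.getElem_drop]
      rw [List.getD_eq_getElem _ _ hidx, List.getD_eq_getElem _ _ hk2]
      simp only [List.length_take, Nat.min_eq_left hr]
  rw [hz, List.map_map, sum_map_range]
  rfl

-- the A-side inner sum equals twice the B-side inner sum
theorem sumA_eq_two_sumB (rows : List (List Char)) (r : Nat) (hr1 : 1 ≤ r)
    (hr : r < rows.length) :
    ((List.range rows.length).foldl (fun s i =>
      if i < r then
        let ri := r * 2 - i - 1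
        if ri < rows.length then s + countDiffs (rows.getD i []) (rows.getD ri []) else s
      else
        let ri : Int := (r : Int) * 2 - 1 - (i : Int)
        if ri ≥ 0 then s + countDiffs (rows.getD i []) (rows.getD ri.toNat []) else s) 0)
      = 2 * ((((rows.take r).reverse.zip (rows.drop r)).map (fun p => countDiffs p.1 p.2)).sum) := by
  set n := rows.length with hn
  rw [sumB_eq rows r (le_of_lt hr)]
  -- turn the foldl into a Finset sum
  have hsplit := foldl_add_map (fun i =>
      if i < r then
        (if r * 2 - i - 1 < n then countDiffs (rows.getD i []) (rows.getD (r * 2 - i - 1) []) else 0)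
      else
        (if ((r : Int) * 2 - 1 - (i : Int)) ≥ 0 then
          countDiffs (rows.getD i []) (rows.getD ((r : Int) * 2 - 1 - (i : Int)).toNat []) else 0))
      (List.range n) 0
  rw [show ((List.range n).foldl (fun s i =>
      if i < r then
        let ri := r * 2 - i - 1
        if ri < n then s + countDiffs (rows.getD i []) (rows.getD ri []) else s
      else
        let ri : Int := (r : Int) * 2 - 1 - (i : Int)
        if ri ≥ 0 then s + countDiffs (rows.getD i []) (rows.getD ri.toNat []) else s) 0)
    = ((List.range n).foldl (fun s i => s +
      (if i < r then
        (if r * 2 - i - 1 < n then countDiffs (rows.getD i []) (rows.getD (r * 2 - i - 1) []) else 0)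
      else
        (if ((r : Int) * 2 - 1 - (i : Int)) ≥ 0 then
          countDiffs (rows.getD i []) (rows.getD ((r : Int) * 2 - 1 - (i : Int)).toNat []) else 0))) 0)
    from foldl_ext _ _ (by
      intro s i
      by_cases h1 : i < r
      · simp only [h1, if_true]
        split_ifs <;> ring
      · simp only [h1, if_false]
        split_ifs <;> ring) _ _]
  rw [hsplit, sum_map_range]
  -- split the range at r
  have hrange : Finset.range n = Finset.Ico 0 n := by rw [Finset.range_eq_Ico]
  rw [hrange, ← Finset.sum_Ico_consecutive _ (Nat.zero_le r) (le_of_lt hr)]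
  rw [← Finset.range_eq_Ico]
  set m := min r (n - r) with hm
  set d : Nat → Nat → Int := fun i j => countDiffs (rows.getD i []) (rows.getD j []) with hd
  -- top half
  have htop : (∑ i ∈ Finset.range r, (if i < r then
        (if r * 2 - i - 1 < n then d i (r * 2 - i - 1) else 0)
      else
        (if ((r : Int) * 2 - 1 - (i : Int)) ≥ 0 then d i ((r : Int) * 2 - 1 - (i : Int)).toNat else 0)))
      = ∑ k ∈ Finset.range m, d (r - 1 - k) (r + k) := by
    have h1 : ∀ i ∈ Finset.range r, (if i < r then
        (if r * 2 - i - 1 < n then d i (r * 2 - i - 1) else 0)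
      else
        (if ((r : Int) * 2 - 1 - (i : Int)) ≥ 0 then d i ((r : Int) * 2 - 1 - (i : Int)).toNat else 0))
        = (if r * 2 - i - 1 < n then d i (r * 2 - i - 1) else 0) := by
      intro i hi; rw [Finset.mem_range] at hi; simp [hi]
    rw [Finset.sum_congr rfl h1]
    rw [← Finset.sum_range_reflect]
    have h2 : ∀ k ∈ Finset.range r,
        (if r * 2 - (r - 1 - k) - 1 < n then d (r - 1 - k) (r * 2 - (r - 1 - k) - 1) else 0)
        = (if r + k < n then d (r - 1 - k) (r + k) else 0) := by
      intro k hk; rw [Finset.mem_range] at hk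
      have : r * 2 - (r - 1 - k) - 1 = r + k := by omega
      rw [this]
    rw [Finset.sum_congr rfl h2]
    rw [Finset.range_eq_Ico, ← Finset.sum_Ico_consecutive _ (Nat.zero_le m) (by omega : m ≤ r),
        ← Finset.range_eq_Ico]
    have h3 : ∑ k ∈ Finset.Ico m r, (if r + k < n then d (r - 1 - k) (r + k) else 0) = 0 := by
      apply Finset.sum_eq_zero
      intro k hk; rw [Finset.mem_Ico] at hk
      have : ¬ (r + k < n) := by omega
      simp [this]
    rw [h3, add_zero]
    exact Finset.sum_congr rfl (by intro k hk; rw [Finset.mem_range] at hk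
                                   have : r + k < n := by omega
                                   simp [this])
  -- bottom half
  have hbot : (∑ i ∈ Finset.Ico r n, (if i < r then
        (if r * 2 - i - 1 < n then d i (r * 2 - i - 1) else 0)
      else
        (if ((r : Int) * 2 - 1 - (i : Int)) ≥ 0 then d i ((r : Int) * 2 - 1 - (i : Int)).toNat else 0)))
      = ∑ k ∈ Finset.range m, d (r - 1 - k) (r + k) := by
    rw [show Finset.Ico r n = Finset.Ico (0 + r) ((n - r) + r) by congr 1 <;> omega,
        Finset.sum_Ico_eq_sum_range]
    simp only [Nat.add_sub_cancel, Nat.zero_add]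
    have h1 : ∀ k ∈ Finset.range (n - r), (if r + k < r then
        (if r * 2 - (r + k) - 1 < n then d (r + k) (r * 2 - (r + k) - 1) else 0)
      else
        (if ((r : Int) * 2 - 1 - ((r + k : Nat) : Int)) ≥ 0 then
          d (r + k) ((r : Int) * 2 - 1 - ((r + k : Nat) : Int)).toNat else 0))
        = (if k < r then d (r - 1 - k) (r + k) else 0) := by
      intro k hk; rw [Finset.mem_range] at hk
      have hnot : ¬ (r + k < r) := by omega
      rw [if_neg hnot]
      by_cases hkr : k < r
      · have hpos : ((r : Int) * 2 - 1 - ((r + k : Nat) : Int)) ≥ 0 := by push_cast; omega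
        rw [if_pos hpos, if_pos hkr]
        have htn : ((r : Int) * 2 - 1 - ((r + k : Nat) : Int)).toNat = r - 1 - k := by
          push_cast
          omega
        rw [htn]
        exact countDiffs_symm _ _
      · have hneg : ¬ (((r : Int) * 2 - 1 - ((r + k : Nat) : Int)) ≥ 0) := by push_cast; omega
        rw [if_neg hneg, if_neg hkr]
    rw [Finset.sum_congr rfl h1]
    rw [Finset.range_eq_Ico, ← Finset.sum_Ico_consecutive _ (Nat.zero_le m) (by omega : m ≤ n - r),
        ← Finset.range_eq_Ico]
    have h3 : ∑ k ∈ Finset.Ico m (n - r), (if k < r then d (r - 1 - k) (r + k) else 0) = 0 := by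
      apply Finset.sum_eq_zero
      intro k hk; rw [Finset.mem_Ico] at hk
      have : ¬ (k < r) := by omega
      simp [this]
    rw [h3, add_zero]
    exact Finset.sum_congr rfl (by intro k hk; rw [Finset.mem_range] at hk
                                   have : k < r := by omega
                                   simp [this])
  rw [htop, hbot]
  ring

-- the loops agree step by step
theorem go_eq (rows : List (List Char)) :
    ∀ fuel r, rows.length - r ≤ fuel → 1 ≤ r →
      findRowGoA rows rows.length r = findRowGoB rows r := by
  intro fuel
  induction fuel with
  | zero =>
    intro r hfr _
    have h : ¬ r < rows.length := by omega
    rw [findRowGoA, findRowGoB]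
    simp [h]
  | succ fuel ih =>
    intro r hfr hr1
    rw [findRowGoA, findRowGoB]
    by_cases h : r < rows.length
    · simp only [h, dif_pos]
      have hkey := sumA_eq_two_sumB rows r hr1 h
      rw [hkey]
      by_cases hs : (((rows.take r).reverse.zip (rows.drop r)).map
          (fun p => countDiffs p.1 p.2)).sum = 1
      · rw [if_pos (by rw [hs]; norm_num), if_pos hs]
      · rw [if_neg (by intro hc; apply hs; omega), if_neg hs]
        exact ih (r + 1) (by omega) (by omega)
    · simp [h]

-- ===== VERDICT (by name: the statement is the Claim_ definition above) =====
theorem find_row_b_spec : Claim_equal_find_row_b := by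
  intro pattern _ _
  unfold Spec_find_row_b find_row_b find_row_b_alt
  exact go_eq _ _ 1 (le_refl _) (le_refl 1)
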